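-- pv_equiv track=rewrite | github.com/Darasimi-Ajewole/HackerRank | Strings/weighted_uniform.py | find_sub
-- ===== SOURCE A (Python) =====
-- def cal_wei(char):
--     return ord(char) - 96
--
-- def find_sub(string):
--     first_char = string[0]
--     checker = [first_char]
--     ans = set()
--     ans.add(cal_wei(first_char))
--
--     for char in string[1:]:
--         if char ==  checker[-1]:
--             checker.append(char)
--             n = len(checker) * cal_wei(char)
--             ans.add(n)
--         else:
--             ans.add(cal_wei(char))
--             checker = [char]
--     return ans
-- ===== SOURCE B (Python) =====
-- def cal_wei(char):
--     return ord(char) - 96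
--
-- def find_sub(string):
--     # group the string into runs of equal characters, then emit w*1..w*r per run
--     runs = []
--     rest = list(string)
--     while rest:
--         c = rest[0]
--         k = 1
--         while k < len(rest) and rest[k] == c:
--             k += 1
--         runs.append((c, k))
--         rest = rest[k:]
--     ans = set()
--     for c, r in runs:
--         w = cal_wei(c)
--         for m in range(1, r + 1):
--             ans.add(w * m)
--     return ans
-- ===== Notes on version B (the rewrite author's own statement) =====
-- stated objective: alternative
-- what changed: B first groups the string into runs of equal characters and then emits w*1..w*r for each run, instead of A's single pass that maintains a growing checker list and adds one weighted value per position.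
-- crash fix: On the empty string A raises IndexError (string[0]); B returns the empty set. — e.g. on find_sub(""): A raises IndexError, B returns []
import Mathlib
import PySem

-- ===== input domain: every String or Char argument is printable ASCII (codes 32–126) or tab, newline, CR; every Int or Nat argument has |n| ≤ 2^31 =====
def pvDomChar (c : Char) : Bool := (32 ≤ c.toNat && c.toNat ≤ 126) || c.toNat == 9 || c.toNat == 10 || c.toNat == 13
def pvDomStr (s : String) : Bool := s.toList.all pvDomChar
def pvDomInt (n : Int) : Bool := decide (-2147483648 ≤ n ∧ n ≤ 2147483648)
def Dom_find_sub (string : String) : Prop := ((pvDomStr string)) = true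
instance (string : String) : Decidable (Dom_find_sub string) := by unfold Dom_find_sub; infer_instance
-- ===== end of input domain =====

-- B groups the string into runs of equal characters and emits w*1..w*r per run (same cost, different decomposition than A's checker-list pass).

-- ===== PORT A =====
def cal_wei (char : Char) : Int := (char.toNat : Int) - 96

def find_sub (string : String) : List Int :=
  match PySem.Str.pyGet? string 0 with
  | none => []  -- unreachable under Pre_find_sub (Python: IndexError on string[0])
  | some first_char =>
    let checker : List Char := [first_char]
    let ans : PySem.Set Int := PySem.Set.add PySem.Set.empty (cal_wei first_char)
    ((PySem.List.slice string.toList (some 1) none).foldl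
      (fun (st : List Char × PySem.Set Int) char =>
        if PySem.List.pyGet? st.1 (-1) = some char then
          let checker := st.1 ++ [char]
          (checker, PySem.Set.add st.2 ((checker.length : Int) * cal_wei char))
        else
          ([char], PySem.Set.add st.2 (cal_wei char)))
      (checker, ans)).2

-- ===== PORT B =====
def cal_wei_alt (char : Char) : Int := (char.toNat : Int) - 96

-- Source B's run-collecting while loop: take the leading run of rest, recurse on rest[k:];
-- the fuel argument (initially the list length, which always suffices) is only a totality guard
def runsOfF : Nat → List Char → List (Char × Nat)
  | _, [] => []
  | 0, _ :: _ => []  -- unreachable: fuel starts at the length and dropWhile shortens the list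
  | fuel + 1, c :: rest =>
      (c, (rest.takeWhile (· == c)).length + 1) :: runsOfF fuel (rest.dropWhile (· == c))

def runsOf (l : List Char) : List (Char × Nat) := runsOfF l.length l

def find_sub_alt (string : String) : List Int :=
  (runsOf string.toList).foldl
    (fun (ans : PySem.Set Int) cr =>
      (PySem.List.pyRange 1 ((cr.2 : Int) + 1) 1).foldl
        (fun a m => PySem.Set.add a (cal_wei_alt cr.1 * m)) ans)
    PySem.Set.empty

-- ===== PRECONDITION & SPEC =====
-- A evaluates string[0] first, so it raises IndexError exactly on the empty string.
def Pre_find_sub (string : String) : Prop := string.toList ≠ []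
instance (string : String) : Decidable (Pre_find_sub string) := by unfold Pre_find_sub; infer_instance
def pvWitness_find_sub : String := "aabc"

-- On the empty string A raises IndexError (string[0]); B returns the empty set.
def Raises_find_sub (string : String) : Prop := string.toList = []
instance (string : String) : Decidable (Raises_find_sub string) := by unfold Raises_find_sub; infer_instance
def pvRaiseWitness_find_sub : String := ""
def pvRaiseWitnessOut_find_sub : List Int := []

def Spec_find_sub (string : String) (out : List Int) : Prop := out = find_sub_alt string
instance (string : String) (out : List Int) : Decidable (Spec_find_sub string out) := by unfold Spec_find_sub; infer_instance

-- ===== CLAIM (what is proved, stated in full; the proofs are below) =====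
def Claim_equal_find_sub : Prop := ∀ (string : String), Dom_find_sub string → Pre_find_sub string → Spec_find_sub string (find_sub string)
def Claim_raises_find_sub : Prop := (∀ (string : String), Dom_find_sub string → Raises_find_sub string → ¬ Pre_find_sub string) ∧ (Dom_find_sub (pvRaiseWitness_find_sub) ∧ Raises_find_sub (pvRaiseWitness_find_sub) ∧ find_sub_alt (pvRaiseWitness_find_sub) = pvRaiseWitnessOut_find_sub)

-- ===== LEMMAS AND PROOFS =====

-- runsOfF ignores the exact fuel as long as it suffices
lemma runsOfF_mono : ∀ (f1 : Nat), ∀ (l : List Char) (f2 : Nat), l.length ≤ f1 → l.length ≤ f2 →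
    runsOfF f1 l = runsOfF f2 l := by
  intro f1
  induction f1 with
  | zero =>
    intro l f2 h1 _
    cases l with
    | nil => cases f2 <;> rfl
    | cons c rest => simp at h1
  | succ g ih =>
    intro l f2 h1 h2
    cases l with
    | nil => cases f2 <;> rfl
    | cons c rest =>
      cases f2 with
      | zero => simp at h2
      | succ h =>
        simp only [runsOfF]
        congr 1
        exact ih _ h
          (le_trans (List.length_dropWhile_le _ _) (by simpa using h1))
          (le_trans (List.length_dropWhile_le _ _) (by simpa using h2))

lemma runsOf_cons (c : Char) (rest : List Char) :
    runsOf (c :: rest) = (c, (rest.takeWhile (· == c)).length + 1) :: runsOf (rest.dropWhile (· == c)) := by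
  simp only [runsOf, List.length_cons, runsOfF]
  congr 1
  exact runsOfF_mono _ _ _ (le_trans (List.length_dropWhile_le _ _) (Nat.le_refl _)) (Nat.le_refl _)

-- A's loop body as a named step function
def stepA (st : List Char × PySem.Set Int) (char : Char) : List Char × PySem.Set Int :=
  if PySem.List.pyGet? st.1 (-1) = some char then
    let checker := st.1 ++ [char]
    (checker, PySem.Set.add st.2 ((checker.length : Int) * cal_wei char))
  else
    ([char], PySem.Set.add st.2 (cal_wei char))

-- emit w*a, w*(a+1), …, w*(b-1) into ans (the pyRange fold of B, generalized start)
def emitSeg (w : Int) (a b : Int) (ans : PySem.Set Int) : PySem.Set Int :=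
  (PySem.List.pyRange a b 1).foldl (fun s m => PySem.Set.add s (w * m)) ans

-- B's outer fold
def runsFold (rs : List (Char × Nat)) (ans : PySem.Set Int) : PySem.Set Int :=
  rs.foldl (fun ans cr => emitSeg (cal_wei_alt cr.1) 1 ((cr.2 : Int) + 1) ans) ans

lemma emitSeg_nil (w : Int) (a b : Int) (h : b ≤ a) (ans : PySem.Set Int) :
    emitSeg w a b ans = ans := by
  simp [emitSeg, PySem.List.pyRange_one_eq_nil h]

lemma emitSeg_cons (w : Int) (a b : Int) (h : a < b) (ans : PySem.Set Int) :
    emitSeg w a b ans = emitSeg w (a + 1) b (PySem.Set.add ans (w * a)) := by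
  rw [emitSeg, PySem.List.pyRange_one_cons h]; rfl

lemma pyGet_last_replicate (m : Nat) (c : Char) :
    PySem.List.pyGet? (List.replicate (m + 1) c) (-1) = some c := by
  rw [PySem.List.pyGet?_neg_one]
  simp [List.getLast?_replicate]

-- the main invariant: A's loop, started with checker = replicate (m+1) c, equals
-- B finishing the current run (emitting w*(m+2)..w*r) and then processing the remaining runs
lemma loop_inv (l : List Char) : ∀ (c : Char) (m : Nat) (ans : PySem.Set Int),
    (l.foldl stepA (List.replicate (m + 1) c, ans)).2 =
      runsFold (runsOf (l.dropWhile (· == c)))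
        (emitSeg (cal_wei c) ((m : Int) + 2) ((m : Int) + (l.takeWhile (· == c)).length + 2) ans) := by
  induction l with
  | nil =>
    intro c m ans
    simp only [List.foldl_nil, List.dropWhile_nil, List.takeWhile_nil, List.length_nil,
      Nat.cast_zero, add_zero]
    rw [emitSeg_nil (cal_wei c) ((m : Int) + 2) ((m : Int) + 2) le_rfl]
    rfl
  | cons x l ih =>
    intro c m ans
    by_cases hx : x = c
    · subst hx
      have e1 : List.replicate (m + 1) x ++ [x] = List.replicate (m + 2) x := by
        rw [show m + 2 = (m + 1) + 1 from rfl]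
        exact (List.replicate_succ' ..).symm
      have hstep : stepA (List.replicate (m + 1) x, ans) x =
          (List.replicate (m + 2) x, PySem.Set.add ans (((m : Int) + 2) * cal_wei x)) := by
        simp only [stepA, pyGet_last_replicate, if_pos, e1]
        simp only [Prod.mk.injEq, true_and]
        congr 1
        simp only [List.length_replicate]
        push_cast
        ring
      rw [List.foldl_cons, hstep, ih x (m + 1) _]
      simp only [List.takeWhile_cons, List.dropWhile_cons, beq_self_eq_true, if_true,
        List.length_cons]
      rw [emitSeg_cons (cal_wei x) ((m : Int) + 2) _ (by push_cast; omega)]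
      have hmul : cal_wei x * ((m : Int) + 2) = ((m : Int) + 2) * cal_wei x := by ring
      rw [hmul]
      congr 1
      push_cast
      ring
    · have hne : PySem.List.pyGet? (List.replicate (m + 1) c) (-1) ≠ some x := by
        rw [pyGet_last_replicate]
        intro h
        exact hx (Option.some.inj h).symm
      have hstep : stepA (List.replicate (m + 1) c, ans) x =
          ([x], PySem.Set.add ans (cal_wei x)) := by
        simp only [stepA, if_neg hne]
      rw [List.foldl_cons, hstep]
      have hthis := ih x 0 (PySem.Set.add ans (cal_wei x))
      rw [show (0 : Nat) + 1 = 1 from rfl, List.replicate_one] at hthis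
      rw [hthis]
      have hbx : (x == c) = false := by simp [hx]
      simp only [List.takeWhile_cons, List.dropWhile_cons, hbx, Bool.false_eq_true, if_false,
        List.length_nil, Nat.cast_zero, add_zero]
      rw [emitSeg_nil (cal_wei c) ((m : Int) + 2) ((m : Int) + 2) le_rfl]
      rw [runsOf_cons]
      simp only [runsFold, List.foldl_cons]
      congr 1
      rw [emitSeg_cons (cal_wei_alt x) 1 _ (by push_cast; omega)]
      simp only [cal_wei, cal_wei_alt, mul_one]
      congr 1
      push_cast
      ring

-- ===== VERDICT (by name: the statement is the Claim_ definition above) =====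
theorem find_sub_spec : Claim_equal_find_sub := by
  intro s _ hpre
  unfold Spec_find_sub find_sub find_sub_alt Pre_find_sub at *
  obtain ⟨c, l, hl⟩ : ∃ c l, s.toList = c :: l := by
    cases h : s.toList with
    | nil => exact absurd h hpre
    | cons c l => exact ⟨c, l, rfl⟩
  have hget : PySem.Str.pyGet? s 0 = some c := by
    simp [hl]
  have hslice : PySem.List.slice s.toList (some 1) none = l := by
    rw [hl]; simp [PySem.List.slice_from]
  rw [hget, hslice]
  show (l.foldl stepA ([c], PySem.Set.add PySem.Set.empty (cal_wei c))).2 = _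
  rw [show ([c] : List Char) = List.replicate (0 + 1) c from rfl, loop_inv l c 0, hl]
  show _ = runsFold (runsOf (c :: l)) PySem.Set.empty
  rw [runsOf_cons]
  simp only [runsFold, List.foldl_cons]
  congr 1
  rw [emitSeg_cons (cal_wei_alt c) 1 _ (by push_cast; omega)]
  simp only [cal_wei, cal_wei_alt, mul_one]
  congr 1
  push_cast
  ring

theorem find_sub_raises : Claim_raises_find_sub := by
  unfold Claim_raises_find_sub
  exact ⟨fun s _ hr hp => hp hr, by decide⟩

-- the checkable half of the crash-fix claim restated at the witness: B's port really returns [] on ""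
theorem find_sub_raises_witness_ok : find_sub_alt pvRaiseWitness_find_sub = pvRaiseWitnessOut_find_sub :=
  find_sub_raises.2.2.2
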